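-- pv_equiv track=rewrite | github.com/JiwonYuwldnjsdb/DSHS-PlayCore | handwritingRcognitionDemo.py | is_vertical_line
-- ===== SOURCE A (Python) =====
-- def is_vertical_line(stroke):
--     if len(stroke) < 2:
--         return False
--     xs = [p[0] for p in stroke]
--     ys = [p[1] for p in stroke]
--     width = max(xs) - min(xs)
--     height = max(ys) - min(ys)
--     return (height > 100 and width < 0.2 * height)
-- ===== SOURCE B (Python) =====
-- def _bbox(pts):
--     # divide-and-conquer bounding box: (min_x, max_x, min_y, max_y)
--     if len(pts) == 1:
--         x, y = pts[0]
--         return (x, x, y, y)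
--     m = len(pts) // 2
--     ax0, ax1, ay0, ay1 = _bbox(pts[:m])
--     bx0, bx1, by0, by1 = _bbox(pts[m:])
--     return (min(ax0, bx0), max(ax1, bx1), min(ay0, by0), max(ay1, by1))
--
-- def is_vertical_line(stroke):
--     if len(stroke) < 2:
--         return False
--     x0, x1, y0, y1 = _bbox(stroke)
--     height = y1 - y0
--     return (height > 100 and x1 - x0 < 0.2 * height)
-- ===== Notes on version B (the rewrite author's own statement) =====
-- stated objective: alternative
-- what changed: Replaces the two temporary coordinate lists and four linear max/min scans with a recursive divide-and-conquer computation of the bounding box that splits the stroke in halves and merges the two sub-boxes.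
import Mathlib
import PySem

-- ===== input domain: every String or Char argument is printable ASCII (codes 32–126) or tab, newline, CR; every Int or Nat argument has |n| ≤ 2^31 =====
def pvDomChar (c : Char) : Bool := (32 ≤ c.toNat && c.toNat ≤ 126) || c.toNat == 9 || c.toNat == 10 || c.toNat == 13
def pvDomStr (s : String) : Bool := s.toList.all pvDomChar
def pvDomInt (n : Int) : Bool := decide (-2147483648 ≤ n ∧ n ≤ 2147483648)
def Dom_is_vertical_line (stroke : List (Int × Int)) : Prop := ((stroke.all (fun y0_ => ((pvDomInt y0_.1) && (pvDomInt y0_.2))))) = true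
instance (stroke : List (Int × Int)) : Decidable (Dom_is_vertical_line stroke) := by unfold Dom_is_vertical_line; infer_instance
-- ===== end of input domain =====

-- B replaces A's two temporary coordinate lists and four linear max/min scans with a
-- recursive divide-and-conquer bounding box (split in halves, merge the sub-boxes);
-- objective: alternative decomposition. The float comparison `width < 0.2 * height`
-- is ported in both programs exactly as the integer comparison `5 * width < height`:
-- for |coords| ≤ 2^31 (the stated Dom) the two agree — the only candidate crossings
-- are heights h = 5k, where the double product 0.2*h = k*(1+2^-54) (< 1/4 ulp off)
-- rounds to exactly k.


-- ===== PORT A =====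
def is_vertical_line (stroke : List (Int × Int)) : Bool :=
  if stroke.length < 2 then false
  else
    let xs := stroke.map (fun p => p.1)
    let ys := stroke.map (fun p => p.2)
    let width := ((PySem.List.max? xs (fun x => x)).getD 0) - ((PySem.List.min? xs (fun x => x)).getD 0)
    let height := ((PySem.List.max? ys (fun x => x)).getD 0) - ((PySem.List.min? ys (fun x => x)).getD 0)
    -- `.getD 0` is never taken: the lists are nonempty here (length ≥ 2)
    decide (height > 100) && decide (5 * width < height)

-- ===== PORT B =====
-- port of Source B's `_bbox`: divide-and-conquer bounding box (min_x, max_x, min_y, max_y).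
-- In Source B `_bbox` is only ever reached with a nonempty list (base case len == 1);
-- the `[]` branch here only makes the match total and is unreachable from is_vertical_line_alt.
def pvBBox (pts : List (Int × Int)) : Int × Int × Int × Int :=
  if _h : pts.length ≤ 1 then
    match pts with
    | [] => (0, 0, 0, 0)
    | (x, y) :: _ => (x, x, y, y)
  else
    let m := pts.length / 2
    let a := pvBBox (pts.take m)
    let b := pvBBox (pts.drop m)
    (min a.1 b.1, max a.2.1 b.2.1, min a.2.2.1 b.2.2.1, max a.2.2.2 b.2.2.2)
termination_by pts.length
decreasing_by
  · simp only [List.length_take]; omega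
  · simp only [List.length_drop]; omega

def is_vertical_line_alt (stroke : List (Int × Int)) : Bool :=
  if stroke.length < 2 then false
  else
    let bb := pvBBox stroke
    let height := bb.2.2.2 - bb.2.2.1
    decide (height > 100) && decide (5 * (bb.2.1 - bb.1) < height)

-- ===== PRECONDITION & SPEC =====
def Spec_is_vertical_line (stroke : List (Int × Int)) (out : Bool) : Prop := out = is_vertical_line_alt stroke
instance (stroke : List (Int × Int)) (out : Bool) : Decidable (Spec_is_vertical_line stroke out) := by unfold Spec_is_vertical_line; infer_instance

-- ===== CLAIM (what is proved, stated in full; the proofs are below) =====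
def Claim_equal_is_vertical_line : Prop := ∀ (stroke : List (Int × Int)), Dom_is_vertical_line stroke → Spec_is_vertical_line stroke (is_vertical_line stroke)

-- ===== LEMMAS AND PROOFS =====

theorem foldl_min_min (l : List Int) (a b : Int) :
    l.foldl min (min a b) = min a (l.foldl min b) := by
  induction l generalizing b with
  | nil => rfl
  | cons x t ih => simp only [List.foldl_cons, min_assoc, ih]

theorem foldl_max_max (l : List Int) (a b : Int) :
    l.foldl max (max a b) = max a (l.foldl max b) := by
  induction l generalizing b with
  | nil => rfl
  | cons x t ih => simp only [List.foldl_cons, max_assoc, ih]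

-- the divide-and-conquer bounding box equals the four running-extreme folds
theorem pvBBox_eq : ∀ (n : ℕ) (pts : List (Int × Int)), pts.length = n →
    ∀ (p : Int × Int) (t : List (Int × Int)), pts = p :: t →
    pvBBox pts = ((t.map Prod.fst).foldl min p.1, (t.map Prod.fst).foldl max p.1,
                  (t.map Prod.snd).foldl min p.2, (t.map Prod.snd).foldl max p.2) := by
  intro n
  induction n using Nat.strong_induction_on with
  | _ n ih =>
    intro pts hlen p t hpts
    subst hpts
    rw [pvBBox]
    by_cases h : (p :: t).length ≤ 1
    · have ht : t = [] := by
        simp only [List.length_cons] at h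
        exact List.eq_nil_of_length_eq_zero (by omega)
      subst ht
      simp [h]
    · simp only [h, dite_false]
      have hlen2 : 2 ≤ (p :: t).length := by omega
      set m := (p :: t).length / 2 with hm
      have hm1 : 1 ≤ m := by omega
      have hmlt : m < (p :: t).length := by omega
      -- take m = p :: t.take (m-1), drop m = t.drop (m-1)
      have htake : (p :: t).take m = p :: t.take (m - 1) := by
        rcases Nat.exists_eq_add_of_le hm1 with ⟨k, hk⟩
        simp [hk, Nat.add_comm]
      have hdrop : (p :: t).drop m = t.drop (m - 1) := by
        rcases Nat.exists_eq_add_of_le hm1 with ⟨k, hk⟩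
        simp [hk, Nat.add_comm]
      have hdne : t.drop (m - 1) ≠ [] := by
        intro hnil
        have := congrArg List.length hnil
        simp only [List.length_drop, List.length_nil] at this
        simp only [List.length_cons] at hmlt
        omega
      obtain ⟨r, t2, hd⟩ := List.exists_cons_of_ne_nil hdne
      have h1 := ih ((p :: t).take m).length
        (by simp only [List.length_take]; omega)
        ((p :: t).take m) rfl p (t.take (m - 1)) htake
      have h2 := ih ((p :: t).drop m).length
        (by simp only [List.length_drop]; omega)
        ((p :: t).drop m) rfl r t2 (by rw [hdrop, hd])
      rw [h1, h2]
      have hsplit : t = t.take (m - 1) ++ (r :: t2) := by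
        conv_lhs => rw [← List.take_append_drop (m - 1) t]
        rw [← hd]
      conv_rhs => rw [hsplit]
      simp only [List.map_append, List.foldl_append, List.map_cons, List.foldl_cons,
        foldl_min_min, foldl_max_max]

-- ===== VERDICT (by name: the statement is the Claim_ definition above) =====
theorem is_vertical_line_spec : Claim_equal_is_vertical_line := by
  intro stroke _
  unfold Spec_is_vertical_line is_vertical_line is_vertical_line_alt
  match stroke with
  | [] => rfl
  | [_] => rfl
  | p :: q :: t =>
    rw [pvBBox_eq (p :: q :: t).length (p :: q :: t) rfl p (q :: t) rfl]
    simp only [List.length_cons, List.map_cons,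
      PySem.List.max?_id_cons, PySem.List.min?_id_cons, Option.getD_some]
    norm_num
    rfl
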